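-- pv_equiv track=rewrite | github.com/Daniel-CG-Wright/filemanipulator | filemanipulator/filemanipulator.py | FindInFile
-- ===== SOURCE A (Python) =====
-- def FindInFile(term, inputstring, instances=0, iterations=1):
--     """Finds the index of a term in a string; for internal use.
--
--     Args:
--         term (str): The term being searched for.
--         inputstring (str): The string to search in.
--         instances (int): The number of instances of the term before the first is given.
--         iterations(int): The number of results that should be searched for.
--     Returns:
--         list: The index of the term in a list, or [-1] if it was not found.
--             A list is returned as there was once a functionality to return multiple
--             points, but this has been revoked unless used directly with 'iterations'
--
--     """
--
--     index = 0
--     indices = []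
--
--     if not isinstance(term, str) or term == "":
--         raise ValueError("Null string provided!")
--
--     if len(term) > len(inputstring):
--         raise ValueError("The chunk size is smaller than the size of the search term ({0})".format(term))
--         """char = term[0]
--         for index, character in enumerate(inputstring):
--
--             if character == char:
--
--
--                 if inputstring[index:] in term:
--
--                     if instances <= 0:
--                         selection.append(inputstring[index:])
--                         return selection #For chunking ONLY
--
--                     elif instances > 0:
--                         instances -= 1
--                         continue
--
--
--                 else: continue
--                 """
--     #If the character is actually in the input string to begin with; saves time
--     if term in inputstring:
--         #For finding the first character of the string.
--         char = term[0]
--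
--
--         for index, character in enumerate(inputstring):
--
--             if character == char:
--
--
--                 if inputstring[index:index+len(term)] == term:
--
--                     if instances <= 0:
--
--                         indices.append(index)
--                         if len(indices) == iterations:
--                             return indices
--                         else: continue
--
--                     elif instances > 0:
--                         instances -= 1
--                         continue
--
--
--                 else: continue
--
--     else: return [-1]
-- ===== SOURCE B (Python) =====
-- def FindInFile(term, inputstring, instances=0, iterations=1):
--     """Collect all (overlapping) occurrence indices with repeated str.find,
--     then select the requested window by slicing."""
--     if not isinstance(term, str) or term == "":
--         raise ValueError("Null string provided!")
--     if len(term) > len(inputstring):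
--         raise ValueError("The chunk size is smaller than the size of the search term ({0})".format(term))
--
--     pos = inputstring.find(term)
--     if pos == -1:
--         return [-1]
--     occurrences = []
--     while pos != -1:
--         occurrences.append(pos)
--         pos = inputstring.find(term, pos + 1)
--     skip = max(instances, 0)
--     return occurrences[skip : skip + iterations]
-- ===== Notes on version B (the rewrite author's own statement) =====
-- stated objective: alternative
-- what changed: Instead of A's per-character scan with stateful skip/limit bookkeeping and an early return inside the loop, B collects all overlapping occurrence indices with repeated str.find(term, pos+1) and then selects the requested window by slicing occurrences[max(instances,0) : max(instances,0)+iterations].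
-- outside the precondition, e.g. on FindInFile('ab', 'abab', 0, 3): A returns None, B returns [0, 2]
import Mathlib
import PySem

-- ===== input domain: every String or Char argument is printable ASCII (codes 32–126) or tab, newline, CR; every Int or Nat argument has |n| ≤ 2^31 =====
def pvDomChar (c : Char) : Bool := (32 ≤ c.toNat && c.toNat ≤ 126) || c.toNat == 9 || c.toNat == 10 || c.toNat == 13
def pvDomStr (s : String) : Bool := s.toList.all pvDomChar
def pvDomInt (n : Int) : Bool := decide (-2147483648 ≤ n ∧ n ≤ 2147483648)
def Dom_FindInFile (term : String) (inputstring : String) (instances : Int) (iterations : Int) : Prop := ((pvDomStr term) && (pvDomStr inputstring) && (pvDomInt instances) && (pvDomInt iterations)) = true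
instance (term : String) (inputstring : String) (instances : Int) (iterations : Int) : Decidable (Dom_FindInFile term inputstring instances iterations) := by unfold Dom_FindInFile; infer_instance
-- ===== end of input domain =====

-- B replaces A's per-character scan (with its stateful skip/limit bookkeeping and early
-- return) by collecting all overlapping occurrence indices with repeated str.find and then
-- slicing out the requested window; objective: alternative decomposition of the same search.

-- ===== PORT A =====
-- A's 'for index, character in enumerate(inputstring)' loop; 'none' = the loop fell off the
-- end and Python returned None (no 'return' reached) — those inputs are outside Pre_.
def pvLoopA (t s : List Char) (iterations : Int) :
    List (Int × Char) → Int → List Int → Option (List Int)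
  | [], _, _ => none
  | (i, c) :: rest, inst, acc =>
    if c = t.headD ' ' then
      if PySem.List.slice s (some i) (some (i + (t.length : Int))) = t then
        if inst ≤ 0 then
          if ((acc ++ [i]).length : Int) = iterations then some (acc ++ [i])
          else pvLoopA t s iterations rest inst (acc ++ [i])
        else pvLoopA t s iterations rest (inst - 1) acc
      else pvLoopA t s iterations rest inst acc
    else pvLoopA t s iterations rest inst acc

def FindInFile (term : String) (inputstring : String) (instances : Int) (iterations : Int) : List Int :=
  let t := term.toList
  let s := inputstring.toList
  if t = [] then []                         -- Python raises ValueError (outside Pre_)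
  else if s.length < t.length then []       -- Python raises ValueError (outside Pre_)
  else if PySem.Chars.isIn t s then
    (pvLoopA t s iterations (PySem.List.enumerate s 0) instances []).getD []
  else [-1]

-- ===== PORT B =====
-- B's 'while pos != -1' find-loop; pos strictly increases, so length+1 steps suffice (fuel).
def pvCollectB (s t : List Char) : Nat → Int → List Int
  | 0, _ => []
  | fuel + 1, pos =>
    if pos = -1 then []
    else pos :: pvCollectB s t fuel (PySem.Chars.findFrom s t (pos + 1) none)

def FindInFile_alt (term : String) (inputstring : String) (instances : Int) (iterations : Int) : List Int :=
  let t := term.toList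
  let s := inputstring.toList
  if t = [] then []                         -- B raises ValueError (outside Pre_)
  else if s.length < t.length then []       -- B raises ValueError (outside Pre_)
  else
    let pos := PySem.Chars.find s t
    if pos = -1 then [-1]
    else
      let occurrences := pvCollectB s t (s.length + 1) pos
      PySem.List.slice occurrences (some (max instances 0)) (some (max instances 0 + iterations))

-- ===== PRECONDITION & SPEC =====
-- all (overlapping) occurrence positions of t in s at index ≥ k
def pvMatchesFrom (t s : List Char) (k : Nat) : List Nat :=
  (List.range' k (s.length - k)).filter (fun i => decide (t <+: s.drop i))

-- Pre_ excludes (a) the inputs where A raises ValueError (empty term, term longer than the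
-- string) and (b) the inputs where A's loop ends without reaching 'len(indices) == iterations'
-- and A returns None, which is not a value of the declared list type (e.g. iterations ≤ 0, or
-- fewer than `instances + iterations` occurrences); B returns the partial list of indices there.
def Pre_FindInFile (term : String) (inputstring : String) (instances : Int) (iterations : Int) : Prop :=
  term.toList ≠ [] ∧ term.toList.length ≤ inputstring.toList.length ∧
  ((pvMatchesFrom term.toList inputstring.toList 0).length = 0 ∨
    (1 ≤ iterations ∧
      iterations ≤ ((pvMatchesFrom term.toList inputstring.toList 0).length : Int) - max instances 0))

instance (term : String) (inputstring : String) (instances : Int) (iterations : Int) : Decidable (Pre_FindInFile term inputstring instances iterations) := by unfold Pre_FindInFile; infer_instance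

def pvWitness_FindInFile : String × String × Int × Int := ("ab", "abab", 0, 2)

def Spec_FindInFile (term : String) (inputstring : String) (instances : Int) (iterations : Int) (out : List Int) : Prop := out = FindInFile_alt term inputstring instances iterations
instance (term : String) (inputstring : String) (instances : Int) (iterations : Int) (out : List Int) : Decidable (Spec_FindInFile term inputstring instances iterations out) := by unfold Spec_FindInFile; infer_instance

-- ===== CLAIM (what is proved, stated in full; the proofs are below) =====
def Claim_equal_FindInFile : Prop := ∀ (term : String) (inputstring : String) (instances : Int) (iterations : Int), Dom_FindInFile term inputstring instances iterations → Pre_FindInFile term inputstring instances iterations → Spec_FindInFile term inputstring instances iterations (FindInFile term inputstring instances iterations)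

-- ===== LEMMAS AND PROOFS =====

-- common reference point: process the list of match positions with A's skip/limit bookkeeping
def pvProc (iterations : Int) : List Nat → Int → List Int → Option (List Int)
  | [], _, _ => none
  | p :: rest, inst, acc =>
    if inst ≤ 0 then
      if ((acc ++ [((p : Nat) : Int)]).length : Int) = iterations then some (acc ++ [((p : Nat) : Int)])
      else pvProc iterations rest inst (acc ++ [((p : Nat) : Int)])
    else pvProc iterations rest (inst - 1) acc

theorem pvSplit_first (q : Nat → Bool) (n p : Nat) (hp : p < n) (hq : q p = true) :
    ∀ (d k : Nat), p - k = d → k ≤ p → (∀ i, k ≤ i → i < p → q i = false) →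
      (List.range' k (n - k)).filter q = p :: (List.range' (p + 1) (n - (p + 1))).filter q := by
  intro d
  induction d with
  | zero =>
    intro k hd hk _
    have : k = p := by omega
    subst this
    have hn : n - k = (n - (k+1)) + 1 := by omega
    rw [hn, List.range'_succ, List.filter_cons, hq]; simp
  | succ d ih =>
    intro k hd hk hmin
    have hkp : k < p := by omega
    have hn : n - k = (n - (k+1)) + 1 := by omega
    rw [hn, List.range'_succ, List.filter_cons, hmin k le_rfl hkp]
    exact ih (k+1) (by omega) (by omega) (fun i h1 h2 => hmin i (by omega) h2)


theorem pvMatchesFrom_step (t s : List Char) (k : Nat) (hk : k < s.length) :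
    pvMatchesFrom t s k
      = if t <+: s.drop k then k :: pvMatchesFrom t s (k+1) else pvMatchesFrom t s (k+1) := by
  unfold pvMatchesFrom
  have h1 : s.length - k = (s.length - (k+1)) + 1 := by omega
  rw [h1, List.range'_succ, List.filter_cons]
  by_cases h : t <+: s.drop k <;> simp [h]

theorem pvLoopA_eq_proc (t s : List Char) (iterations : Int) (ht : t ≠ []) :
    ∀ (l : List Char) (k : Nat), l = s.drop k →
      ∀ (inst : Int) (acc : List Int),
        pvLoopA t s iterations (PySem.List.enumerate l (k : Int)) inst acc
          = pvProc iterations (pvMatchesFrom t s k) inst acc := by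
  intro l
  induction l with
  | nil =>
    intro k hk inst acc
    have hlen : s.length ≤ k := by
      by_contra h
      have : s.drop k ≠ [] := by simp [List.drop_eq_nil_iff]; omega
      exact this hk.symm
    have h0 : s.length - k = 0 := by omega
    simp [pvMatchesFrom, h0, pvLoopA, pvProc, PySem.List.enumerate]
  | cons c l' ih =>
    intro k hk inst acc
    have hks : k < s.length := by
      by_contra h
      rw [List.drop_eq_nil_of_le (by omega)] at hk
      simp at hk
    have hdrop : l' = s.drop (k+1) := by
      have := congrArg List.tail hk
      simpa [List.tail_drop] using this
    have hcast : ((k : Int) + 1) = (((k+1 : Nat)) : Int) := by push_cast; ring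
    have hslice : PySem.List.slice s (some ((k : Nat) : Int)) (some (((k : Nat) : Int) + (t.length : Int)))
        = (s.drop k).take t.length := PySem.List.slice_natCast_add s k t.length
    rw [PySem.List.enumerate_cons, pvMatchesFrom_step t s k hks]
    obtain ⟨t0, t', rfl⟩ := List.exists_cons_of_ne_nil ht
    by_cases hpre : (t0 :: t') <+: s.drop k
    · have htake : (s.drop k).take (t0 :: t').length = (t0 :: t') := (List.prefix_iff_eq_take.mp hpre).symm
      have hc : c = t0 := by
        rw [← hk] at htake
        simp only [List.length_cons, List.take_succ_cons, List.cons.injEq] at htake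
        exact htake.1
      rw [if_pos hpre]
      show pvLoopA _ s iterations _ inst acc = _
      rw [pvLoopA, if_pos (by simpa using hc), if_pos (hslice.trans htake), pvProc]
      split_ifs with h1 h2
      · rfl
      · rw [hcast, ih (k+1) hdrop]
      · rw [hcast, ih (k+1) hdrop]
    · rw [if_neg hpre]
      have hne : PySem.List.slice s (some ((k:Nat) : Int)) (some (((k:Nat) : Int) + ((t0 :: t').length : Int))) ≠ (t0 :: t') := by
        rw [hslice]
        intro h
        exact hpre (List.prefix_iff_eq_take.mpr h.symm)
      rw [pvLoopA]
      by_cases hc : c = (t0 :: t').headD ' '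
      · rw [if_pos hc, if_neg hne, hcast, ih (k+1) hdrop]
      · rw [if_neg hc, hcast, ih (k+1) hdrop]

theorem pvInfixDrop (t s : List Char) (k i : Nat) (hk : k ≤ i) (hp : t <+: s.drop i) :
    t <:+: s.drop k := by
  rw [List.infix_iff_prefix_suffix]
  refine ⟨s.drop i, hp, ?_⟩
  have hdd : s.drop i = (s.drop k).drop (i - k) := by
    rw [List.drop_drop]
    congr 1
    omega
  rw [hdd]
  exact List.drop_suffix _ _

theorem pvCollectB_eq (t s : List Char) (ht : t ≠ []) :
    ∀ (fuel k : Nat), k ≤ s.length → (pvMatchesFrom t s k).length < fuel →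
      pvCollectB s t fuel (PySem.Chars.findFrom s t (k : Int) none)
        = (pvMatchesFrom t s k).map (fun (p : Nat) => (p : Int)) := by
  intro fuel
  induction fuel with
  | zero => intro k _ hlen; omega
  | succ fuel ih =>
    intro k hk hlen
    by_cases hf : PySem.Chars.findFrom s t (k : Int) none = -1
    · have hnin : ¬ t <:+: s.drop k := (PySem.Chars.findFrom_natCast_eq_neg_one_iff s t k hk).mp hf
      have hempty : pvMatchesFrom t s k = [] := by
        rw [pvMatchesFrom, List.filter_eq_nil_iff]
        intro i hi
        simp only [List.mem_range'_1] at hi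
        simp only [decide_eq_true_eq]
        exact fun hp => hnin (pvInfixDrop t s k i hi.1 hp)
      rw [pvCollectB, if_pos hf, hempty]
      simp
    · obtain ⟨h1, h2, h3⟩ := PySem.Chars.findFrom_natCast_spec s t k hk hf
      have hf0 : 0 ≤ PySem.Chars.findFrom s t (k : Int) none := le_trans (by positivity) h1
      set p := (PySem.Chars.findFrom s t (k : Int) none).toNat with hpdef
      have hfp : PySem.Chars.findFrom s t (k : Int) none = (p : Int) := (Int.toNat_of_nonneg hf0).symm
      have hplen : p < s.length := by
        have hne : s.drop p ≠ [] := by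
          intro h
          rw [h] at h2
          exact ht (List.prefix_nil.mp h2)
        rw [ne_eq, List.drop_eq_nil_iff] at hne
        omega
      have hkp : k ≤ p := by omega
      have hsplit : pvMatchesFrom t s k = p :: pvMatchesFrom t s (p+1) := by
        rw [pvMatchesFrom, pvMatchesFrom]
        exact pvSplit_first _ s.length p hplen (by simpa using h2) (p - k) k rfl hkp
          (fun i hik hip => by simpa using h3 i hik hip)
      rw [pvCollectB, if_neg hf, hsplit, List.map_cons, hfp]
      have hc1 : ((p : Int)) + 1 = (((p+1 : Nat)) : Int) := by push_cast; ring
      rw [hc1, ih (p+1) (by omega) (by rw [hsplit] at hlen; simp only [List.length_cons] at hlen; omega)]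

theorem pvNoMatch_not_infix (t s : List Char) (ht : t ≠ [])
    (h : (pvMatchesFrom t s 0).length = 0) : ¬ t <:+: s := by
  intro hinf
  rw [List.length_eq_zero_iff, pvMatchesFrom, List.filter_eq_nil_iff] at h
  have : ∃ j, t <+: s.drop j := by
    obtain ⟨u, v, rfl⟩ := hinf
    refine ⟨u.length, ?_⟩
    rw [List.append_assoc, List.drop_left]
    exact List.prefix_append t v
  obtain ⟨j, hj⟩ := this
  have hjlen : j < s.length := by
    have hne : s.drop j ≠ [] := fun hh => ht (List.prefix_nil.mp (hh ▸ hj))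
    rw [ne_eq, List.drop_eq_nil_iff] at hne
    omega
  exact h j (by simp [List.mem_range'_1]; omega) (by simpa using hj)

theorem pvProc_spec (iterations : Int) :
    ∀ (L : List Nat) (inst : Int) (acc : List Int),
      (acc.length : Int) < iterations →
      iterations - acc.length ≤ (L.length : Int) - max inst 0 →
      pvProc iterations L inst acc
        = some (acc ++ (((L.drop (max inst 0).toNat).take (iterations - acc.length).toNat).map (fun (p : Nat) => (p : Int)))) := by
  intro L
  induction L with
  | nil =>
    intro inst acc h1 h2
    exfalso
    simp only [List.length_nil, Nat.cast_zero, zero_sub] at h2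
    have := le_max_right inst (0:Int)
    omega
  | cons p rest ih =>
    intro inst acc h1 h2
    rw [pvProc]
    by_cases hi : inst ≤ 0
    · have hm : max inst 0 = 0 := max_eq_right hi
      rw [if_pos hi]
      by_cases he : (((acc ++ [((p:Nat) : Int)]).length : Int)) = iterations
      · rw [if_pos he]
        have ht1 : (iterations - acc.length).toNat = 1 := by
          simp only [List.length_append, List.length_cons, List.length_nil] at he
          omega
        simp [hm, ht1]
      · rw [if_neg he]
        have hlt : ((acc ++ [((p:Nat) : Int)]).length : Int) < iterations := by
          simp only [List.length_append, List.length_cons, List.length_nil] at he ⊢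
          push_cast
          simp only [List.length_cons, Nat.cast_add] at h2
          omega
        rw [ih inst (acc ++ [((p:Nat) : Int)]) hlt
          (by simp only [List.length_append, List.length_cons, List.length_nil, List.length_cons, Nat.cast_add] at h2 ⊢; push_cast; omega)]
        have ht1 : (iterations - acc.length).toNat = (iterations - (acc ++ [((p:Nat) : Int)]).length).toNat + 1 := by
          simp only [List.length_append, List.length_cons, List.length_nil] at hlt ⊢
          omega
        simp [hm, ht1, List.take_succ_cons]
    · rw [if_neg hi]
      have e1 : (max inst 0).toNat = (max (inst-1) 0).toNat + 1 := by omega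
      rw [ih (inst-1) acc h1 (by simp only [List.length_cons, Nat.cast_add] at h2; omega)]
      rw [e1, List.drop_succ_cons]

-- ===== VERDICT (by name: the statement is the Claim_ definition above) =====
theorem pvMatchesFrom_length_le (t s : List Char) : (pvMatchesFrom t s 0).length ≤ s.length := by
  calc (pvMatchesFrom t s 0).length ≤ (List.range' 0 (s.length - 0)).length :=
        List.length_filter_le _ _
    _ = s.length := by simp

-- ===== VERDICT (by name: the statement is the Claim_ definition above) =====
theorem FindInFile_spec : Claim_equal_FindInFile := by
  intro term inputstring instances iterations _ hpre
  obtain ⟨ht, hlen, hocc⟩ := hpre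
  unfold Spec_FindInFile FindInFile FindInFile_alt
  simp only []
  rw [if_neg ht, if_neg ht, if_neg (by omega : ¬ inputstring.toList.length < term.toList.length),
    if_neg (by omega : ¬ inputstring.toList.length < term.toList.length)]
  set t := term.toList
  set s := inputstring.toList
  by_cases hocc0 : (pvMatchesFrom t s 0).length = 0
  · have hninf := pvNoMatch_not_infix t s ht hocc0
    have hIsIn : PySem.Chars.isIn t s = false := (PySem.Chars.isIn_eq_false_iff _ _).mpr hninf
    have hfind : PySem.Chars.find s t = -1 := (PySem.Chars.find_eq_neg_one_iff _ _).mpr hninf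
    rw [hIsIn, hfind]
    simp
  · have h2 : 1 ≤ iterations ∧
        iterations ≤ ((pvMatchesFrom t s 0).length : Int) - max instances 0 :=
      hocc.resolve_left hocc0
    obtain ⟨i, hi⟩ := List.exists_mem_of_ne_nil (pvMatchesFrom t s 0) (by
      intro h
      rw [h] at hocc0
      simp at hocc0)
    have hip : t <+: s.drop i := by
      have := List.of_mem_filter hi
      simpa using this
    have hinf : t <:+: s := by
      simpa using pvInfixDrop t s 0 i (Nat.zero_le i) hip
    have hIsIn : PySem.Chars.isIn t s = true := (PySem.Chars.isIn_iff_infix _ _).mpr hinf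
    have hfind : PySem.Chars.find s t ≠ -1 := (PySem.Chars.find_ne_neg_one_iff _ _).mpr hinf
    rw [hIsIn, if_neg hfind]
    -- A side
    have hA := pvLoopA_eq_proc t s iterations ht s 0 (by simp) instances []
    push_cast at hA
    rw [hA, pvProc_spec iterations _ instances []
      (by simp only [List.length_nil, Nat.cast_zero]; omega)
      (by simp only [List.length_nil, Nat.cast_zero, sub_zero]; omega)]
    -- B side
    have hB := pvCollectB_eq t s ht (s.length + 1) 0 (by omega)
      (by have := pvMatchesFrom_length_le t s; omega)
    push_cast at hB
    rw [PySem.Chars.findFrom_zero] at hB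
    rw [hB, PySem.List.slice_toNat _ (le_max_right _ _) (by omega)]
    have hbe : (max instances 0 + iterations).toNat - (max instances 0).toNat = iterations.toNat := by
      omega
    simp [hbe, List.map_take, List.map_drop]
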